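-- pv_equiv track=rewrite | github.com/zadorian/SEARCH_ENGINEER | BACKEND/modules/brute/filtering/ranking/tier_classifier.py | _get_tier_distribution
-- ===== SOURCE A (Python) =====
-- from typing import List, Dict, Any, Optional, Tuple
--
-- def _get_tier_distribution(results: List[Dict[str, Any]]) -> Dict[str, int]:
--     """Get tier distribution for a set of results."""
--     distribution = {'tier_1': 0, 'tier_2': 0, 'tier_3': 0, 'tier_4': 0}
--
--     for result in results:
--         tier = result.get('classification_tier', 4)
--         tier_key = f'tier_{tier}'
--         if tier_key in distribution:
--             distribution[tier_key] += 1
--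
--     return distribution
-- ===== SOURCE B (Python) =====
-- from typing import List, Dict, Any
--
-- def _get_tier_distribution(results: List[Dict[str, Any]]) -> Dict[str, int]:
--     """Per-tier counting: for each of the four fixed tier keys, scan the
--     results and count how many rows format to that key."""
--     return {
--         k: sum(1 for r in results
--                if f"tier_{r.get('classification_tier', 4)}" == k)
--         for k in ('tier_1', 'tier_2', 'tier_3', 'tier_4')
--     }
-- ===== Notes on version B (the rewrite author's own statement) =====
-- stated objective: alternative
-- what changed: B inverts the loop nesting: instead of A's single pass over results with guarded in-place increments on a pre-seeded dict, B iterates over the four fixed tier keys and for each key performs its own counting scan of the results.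
import Mathlib
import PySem

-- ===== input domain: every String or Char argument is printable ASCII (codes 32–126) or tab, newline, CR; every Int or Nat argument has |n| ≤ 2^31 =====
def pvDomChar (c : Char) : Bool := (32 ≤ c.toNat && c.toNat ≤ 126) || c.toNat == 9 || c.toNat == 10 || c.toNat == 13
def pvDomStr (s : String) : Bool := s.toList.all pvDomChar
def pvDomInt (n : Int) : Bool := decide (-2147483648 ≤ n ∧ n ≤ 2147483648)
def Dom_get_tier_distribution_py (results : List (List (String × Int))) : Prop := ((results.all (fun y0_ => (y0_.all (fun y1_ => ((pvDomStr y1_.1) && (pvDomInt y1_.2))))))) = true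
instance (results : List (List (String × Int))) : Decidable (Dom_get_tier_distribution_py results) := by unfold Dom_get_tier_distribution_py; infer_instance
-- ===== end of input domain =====

-- B inverts the loop nesting: it iterates over the four fixed tier keys and counts each key's
-- matches with its own scan of the results, instead of A's single guarded-increment pass over a
-- pre-seeded dict (objective: alternative).

-- ===== PORT A =====
def get_tier_distribution_py (results : List (List (String × Int))) : List (String × Int) :=
  let distribution : PySem.Dict String Int :=
    ((((PySem.Dict.empty.insert "tier_1" 0).insert "tier_2" 0).insert "tier_3" 0).insert "tier_4" 0)
  let final := results.foldl (fun d result =>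
    let tier := (PySem.Dict.mk result).getD "classification_tier" 4
    let tier_key := "tier_" ++ PySem.Int.toStr tier
    if d.contains tier_key then d.modify tier_key 0 (· + 1) else d) distribution
  final.items

-- ===== PORT B =====
def get_tier_distribution_py_alt (results : List (List (String × Int))) : List (String × Int) :=
  ["tier_1", "tier_2", "tier_3", "tier_4"].map (fun k =>
    (k, results.foldl (fun acc r =>
          if "tier_" ++ PySem.Int.toStr ((PySem.Dict.mk r).getD "classification_tier" 4) = k
          then acc + 1 else acc) (0 : Int)))

-- ===== PRECONDITION & SPEC =====
def Spec_get_tier_distribution_py (results : List (List (String × Int))) (out : List (String × Int)) : Prop := out = get_tier_distribution_py_alt results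
instance (results : List (List (String × Int))) (out : List (String × Int)) : Decidable (Spec_get_tier_distribution_py results out) := by unfold Spec_get_tier_distribution_py; infer_instance

-- ===== CLAIM (what is proved, stated in full; the proofs are below) =====
def Claim_equal_get_tier_distribution_py : Prop := ∀ (results : List (List (String × Int))), Dom_get_tier_distribution_py results → Spec_get_tier_distribution_py results (get_tier_distribution_py results)

-- ===== LEMMAS AND PROOFS =====

-- the formatted tier key of one result row
def pvKeyOf (result : List (String × Int)) : String :=
  "tier_" ++ PySem.Int.toStr ((PySem.Dict.mk result).getD "classification_tier" 4)

def pvTiers : List String := ["tier_1", "tier_2", "tier_3", "tier_4"]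

-- A's loop body, named for the induction
def pvStepA (d : PySem.Dict String Int) (result : List (String × Int)) : PySem.Dict String Int :=
  if d.contains (pvKeyOf result) then d.modify (pvKeyOf result) 0 (· + 1) else d

lemma pvStepA_keys (d : PySem.Dict String Int) (r : List (String × Int)) :
    (pvStepA d r).keys = d.keys := by
  unfold pvStepA
  split_ifs with h
  · simp [PySem.Dict.keys_modify, PySem.Dict.keys_insert_of_contains, h]
  · rfl

lemma pvStepA_getD (d : PySem.Dict String Int) (r : List (String × Int)) (k : String)
    (hk : d.contains k = true) :
    (pvStepA d r).getD k 0 = d.getD k 0 + (if pvKeyOf r = k then 1 else 0) := by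
  unfold pvStepA
  split_ifs with h hkey hkey
  · subst hkey; exact PySem.Dict.getD_modify_self d _ 0 _
  · rw [PySem.Dict.getD_modify_of_ne]; · ring
    exact fun e => hkey e.symm
  · subst hkey; rw [hk] at h; exact absurd rfl h
  · ring

lemma pvLoopA (l : List (List (String × Int))) (d : PySem.Dict String Int)
    (hnd : d.keys.Nodup) (hkeys : d.keys = pvTiers) :
    (l.foldl pvStepA d).items =
      pvTiers.map (fun k => (k, d.getD k 0 + ((l.map pvKeyOf).count k : Int))) := by
  induction l generalizing d with
  | nil =>
      simp only [List.foldl_nil, List.map_nil, List.count_nil]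
      rw [PySem.Dict.items_eq_map_keys d hnd 0, hkeys]
      simp
  | cons r l ih =>
      rw [List.foldl_cons, ih (pvStepA d r)
        (by rw [pvStepA_keys]; exact hnd) (by rw [pvStepA_keys]; exact hkeys)]
      apply List.map_congr_left
      intro k hk
      have hc : d.contains k = true := by
        rw [PySem.Dict.contains_iff_mem_keys] at *
        · rw [hkeys]; exact hk
      rw [pvStepA_getD d r k hc]
      simp only [List.map_cons, List.count_cons]
      simp only [Prod.mk.injEq, beq_iff_eq, true_and]
      push_cast
      split_ifs <;> ring

-- B's per-key scan counts exactly the occurrences of k among the formatted keys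
lemma pvScanB (l : List (List (String × Int))) (k : String) (a : Int) :
    l.foldl (fun acc r => if pvKeyOf r = k then acc + 1 else acc) a
      = a + ((l.map pvKeyOf).count k : Int) := by
  induction l generalizing a with
  | nil => simp
  | cons r l ih =>
      rw [List.foldl_cons, ih]
      simp only [List.map_cons, List.count_cons, beq_iff_eq]
      split_ifs with h <;> push_cast [h] <;> ring

-- ===== VERDICT (by name: the statement is the Claim_ definition above) =====
theorem get_tier_distribution_py_spec : Claim_equal_get_tier_distribution_py := by
  intro results _
  unfold Spec_get_tier_distribution_py get_tier_distribution_py get_tier_distribution_py_alt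
  have hA : results.foldl (fun d result =>
      let tier := (PySem.Dict.mk result).getD "classification_tier" 4
      let tier_key := "tier_" ++ PySem.Int.toStr tier
      if d.contains tier_key then d.modify tier_key 0 (· + 1) else d)
      ((((PySem.Dict.empty.insert "tier_1" 0).insert "tier_2" 0).insert "tier_3" 0).insert "tier_4" 0)
    = results.foldl pvStepA
      ((((PySem.Dict.empty.insert "tier_1" 0).insert "tier_2" 0).insert "tier_3" 0).insert "tier_4" 0) := rfl
  simp only [hA]
  rw [pvLoopA results _ (by decide) (by decide)]
  apply List.map_congr_left
  intro k hk
  have hB : results.foldl (fun acc r =>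
      if "tier_" ++ PySem.Int.toStr ((PySem.Dict.mk r).getD "classification_tier" 4) = k
      then acc + 1 else acc) (0 : Int)
    = results.foldl (fun acc r => if pvKeyOf r = k then acc + 1 else acc) (0 : Int) := rfl
  rw [hB, pvScanB]
  have h0 : (((((PySem.Dict.empty.insert "tier_1" 0).insert "tier_2" 0).insert "tier_3" 0).insert "tier_4" 0) : PySem.Dict String Int).getD k 0 = 0 := by
    fin_cases hk <;> decide
  rw [h0, zero_add]
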